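-- pv_equiv track=rewrite | github.com/steadyGuy/japanese-puzzle-solver | generators/all_possible_variants_generator.py | generate_all_variants_of_a_room
-- ===== SOURCE A (Python) =====
-- import copy
-- import itertools
--
-- def generate_all_variants_of_a_room(rooms, keys):
--     """Generate all possible variants of a room with S, A or empty string"""
--     variants = []
--     for variant in itertools.product(keys, repeat=len(rooms)):
--         for i, room in enumerate(rooms):
--             first_key = next(iter(room))
--             room[first_key] = variant[i]
--         variants.append(copy.deepcopy(rooms))
--
--     return variants
-- ===== SOURCE B (Python) =====
-- import copy
--
-- def generate_all_variants_of_a_room(rooms, keys):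
--     """Generate all possible variants of a room with S, A or empty string"""
--     variants = []
--
--     def rec(i):
--         if i == len(rooms):
--             variants.append(copy.deepcopy(rooms))
--             return
--         for key in keys:
--             first_key = next(iter(rooms[i]))
--             rooms[i][first_key] = key
--             rec(i + 1)
--
--     rec(0)
--     return variants
-- ===== Notes on version B (the rewrite author's own statement) =====
-- stated objective: alternative
-- what changed: Replaces the itertools.product loop (materialised full variant tuples, then per-tuple mutation pass) by a backtracking recursion over the rooms that assigns one room per level and snapshots at the leaves; same in-place mutation and output order.
import Mathlib
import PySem

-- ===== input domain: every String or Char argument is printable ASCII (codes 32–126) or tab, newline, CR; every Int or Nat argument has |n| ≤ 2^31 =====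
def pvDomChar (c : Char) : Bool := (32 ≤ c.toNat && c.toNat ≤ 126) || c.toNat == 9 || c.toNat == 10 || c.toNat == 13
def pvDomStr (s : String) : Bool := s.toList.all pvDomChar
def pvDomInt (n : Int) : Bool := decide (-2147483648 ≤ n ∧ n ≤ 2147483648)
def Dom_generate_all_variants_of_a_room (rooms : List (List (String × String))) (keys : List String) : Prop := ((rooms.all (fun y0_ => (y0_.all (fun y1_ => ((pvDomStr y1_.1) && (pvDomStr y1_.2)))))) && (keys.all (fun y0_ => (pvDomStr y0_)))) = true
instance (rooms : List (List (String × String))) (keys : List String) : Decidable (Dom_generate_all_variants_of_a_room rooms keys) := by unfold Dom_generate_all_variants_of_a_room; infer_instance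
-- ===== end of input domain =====

-- B replaces the itertools.product loop by a backtracking recursion over the rooms (different
-- decomposition, same cost); B performs the same in-place mutation of `rooms` as A.
-- Equivalence here is about the RETURN value.

-- ===== PORT A =====
-- shared primitive for Python's `first_key = next(iter(room)); room[first_key] = k`:
-- overwrite the value of the dict's first key (dicts have distinct keys, so this is the head entry).
-- On an empty room Python raises StopIteration; such inputs are outside Pre_.
def setRoomFirstKey (room : List (String × String)) (k : String) : List (String × String) :=
  match room with
  | [] => []
  | (k0, _) :: rest => (k0, k) :: rest

-- itertools.product(keys, repeat=n), first coordinate varies slowest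
def pvProduct (keys : List String) : Nat → List (List String)
  | 0 => [[]]
  | n + 1 => keys.flatMap (fun k => (pvProduct keys n).map (fun v => k :: v))

-- one iteration of A's outer loop: mutate every room's first key to variant[i], snapshot
def pvStepA (st : List (List (String × String)) × List (List (List (String × String))))
    (variant : List String) :
    List (List (String × String)) × List (List (List (String × String))) :=
  let rooms' := List.zipWith setRoomFirstKey st.1 variant
  (rooms', st.2 ++ [rooms'])

def generate_all_variants_of_a_room (rooms : List (List (String × String))) (keys : List String) :
    List (List (List (String × String))) :=
  ((pvProduct keys rooms.length).foldl pvStepA (rooms, [])).2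

-- ===== PORT B =====
-- rec(i) of Source B: `pre` is rooms[0..i-1] with their assignments made, the argument is rooms[i..]
def pvAltRec (keys : List String) (pre : List (List (String × String))) :
    List (List (String × String)) → List (List (List (String × String)))
  | [] => [pre]
  | room :: rest => keys.flatMap (fun k => pvAltRec keys (pre ++ [setRoomFirstKey room k]) rest)

def generate_all_variants_of_a_room_alt (rooms : List (List (String × String))) (keys : List String) :
    List (List (List (String × String))) :=
  pvAltRec keys [] rooms

-- ===== PRECONDITION & SPEC =====
-- Pre_ excludes exactly the inputs where the Python raises StopIteration: a nonempty key list
-- together with some empty room (both A and B then hit next(iter({}))).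
def Pre_generate_all_variants_of_a_room (rooms : List (List (String × String))) (keys : List String) : Prop :=
  keys = [] ∨ ∀ room ∈ rooms, room ≠ []
instance (rooms : List (List (String × String))) (keys : List String) : Decidable (Pre_generate_all_variants_of_a_room rooms keys) := by unfold Pre_generate_all_variants_of_a_room; infer_instance

def pvWitness_generate_all_variants_of_a_room : (List (List (String × String))) × List String :=
  ([[("a", "x")], [("b", "y")]], ["S", "A"])

def Spec_generate_all_variants_of_a_room (rooms : List (List (String × String))) (keys : List String) (out : List (List (List (String × String)))) : Prop := out = generate_all_variants_of_a_room_alt rooms keys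
instance (rooms : List (List (String × String))) (keys : List String) (out : List (List (List (String × String)))) : Decidable (Spec_generate_all_variants_of_a_room rooms keys out) := by unfold Spec_generate_all_variants_of_a_room; infer_instance

-- ===== CLAIM (what is proved, stated in full; the proofs are below) =====
def Claim_equal_generate_all_variants_of_a_room : Prop := ∀ (rooms : List (List (String × String))) (keys : List String), Dom_generate_all_variants_of_a_room rooms keys → Pre_generate_all_variants_of_a_room rooms keys → Spec_generate_all_variants_of_a_room rooms keys (generate_all_variants_of_a_room rooms keys)

-- ===== LEMMAS AND PROOFS =====

theorem length_mem_pvProduct (keys : List String) :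
    ∀ (n : Nat), ∀ v ∈ pvProduct keys n, v.length = n := by
  intro n
  induction n with
  | zero => intro v hv; simp [pvProduct] at hv; simp [hv]
  | succ m ih =>
    intro v hv
    simp only [pvProduct, List.mem_flatMap, List.mem_map] at hv
    obtain ⟨k, _, w, hw, rfl⟩ := hv
    simp [ih w hw]

theorem setRoomFirstKey_idem (r : List (String × String)) (a b : String) :
    setRoomFirstKey (setRoomFirstKey r a) b = setRoomFirstKey r b := by
  cases r with
  | nil => rfl
  | cons p rest => cases p; rfl

theorem zipWith_set_twice :
    ∀ (rooms : List (List (String × String))) (v0 v : List String), v0.length = v.length →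
      List.zipWith setRoomFirstKey (List.zipWith setRoomFirstKey rooms v0) v =
      List.zipWith setRoomFirstKey rooms v := by
  intro rooms
  induction rooms with
  | nil => intro v0 v _; simp
  | cons r rs ih =>
    intro v0 v hlen
    cases v0 with
    | nil =>
      cases v with
      | nil => simp
      | cons b v' => simp at hlen
    | cons a v0' =>
      cases v with
      | nil => simp at hlen
      | cons b v' =>
        simp only [List.zipWith, setRoomFirstKey_idem]
        rw [ih v0' v' (by simpa using hlen)]

theorem foldA_snapshots (rooms : List (List (String × String))) (n : Nat) :
    ∀ (prod : List (List String)), (∀ v ∈ prod, v.length = n) →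
      ∀ (cur : List (List (String × String))) (acc : List (List (List (String × String)))),
        (∀ v : List String, v.length = n →
            List.zipWith setRoomFirstKey cur v = List.zipWith setRoomFirstKey rooms v) →
        (prod.foldl pvStepA (cur, acc)).2 =
          acc ++ prod.map (fun v => List.zipWith setRoomFirstKey rooms v) := by
  intro prod
  induction prod with
  | nil => intro _ cur acc _; simp
  | cons v vs ih =>
    intro hlen cur acc hcur
    have hv : v.length = n := hlen v (by simp)
    have hstep : List.zipWith setRoomFirstKey cur v = List.zipWith setRoomFirstKey rooms v :=
      hcur v hv
    simp only [List.foldl_cons, pvStepA, hstep]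
    rw [ih (fun w hw => hlen w (by simp [hw])) _ _
        (fun w hw => by
          rw [zipWith_set_twice rooms v w (hv.trans hw.symm)])]
    simp

theorem pvAltRec_eq_map (keys : List String) :
    ∀ (rest : List (List (String × String))) (pre : List (List (String × String))),
      pvAltRec keys pre rest =
        (pvProduct keys rest.length).map
          (fun v => pre ++ List.zipWith setRoomFirstKey rest v) := by
  intro rest
  induction rest with
  | nil => intro pre; simp [pvAltRec, pvProduct]
  | cons room rest' ih =>
    intro pre
    simp only [pvAltRec, List.length_cons, pvProduct, List.map_flatMap, List.map_map]
    refine List.flatMap_congr (fun k _ => ?_)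
    rw [ih]
    simp [Function.comp, List.append_assoc]

theorem both_eq (rooms : List (List (String × String))) (keys : List String) :
    generate_all_variants_of_a_room rooms keys = generate_all_variants_of_a_room_alt rooms keys := by
  unfold generate_all_variants_of_a_room generate_all_variants_of_a_room_alt
  rw [foldA_snapshots rooms rooms.length (pvProduct keys rooms.length)
      (length_mem_pvProduct keys rooms.length) rooms [] (fun v _ => rfl)]
  rw [pvAltRec_eq_map]
  simp

-- ===== VERDICT (by name: the statement is the Claim_ definition above) =====
theorem generate_all_variants_of_a_room_spec : Claim_equal_generate_all_variants_of_a_room := by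
  intro rooms keys _ _
  unfold Spec_generate_all_variants_of_a_room
  exact both_eq rooms keys
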